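-- pv_equiv track=rewrite | github.com/alberto-jj/fuse_d | src/state.py | parse_exclude_text
-- ===== SOURCE A (Python) =====
-- def parse_exclude_text(txt: str) -> list[str]:
--     if txt is None:
--         return []
--     txt = str(txt).strip()
--     if not txt:
--         return []
--
--     parts: list[str] = []
--     for chunk in txt.split(","):
--         chunk = chunk.strip()
--         if not chunk:
--             continue
--         parts.extend([p.strip() for p in chunk.split() if p.strip()])
--
--     seen = set()
--     out: list[str] = []
--     for p in parts:
--         if p not in seen:
--             seen.add(p)
--             out.append(p)
--     return out
-- ===== SOURCE B (Python) =====
-- def parse_exclude_text(txt):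
--     if txt is None:
--         return []
--     tokens = []
--     cur = []
--     for ch in str(txt):
--         if ch == ',' or ch.isspace():
--             if cur:
--                 tokens.append(''.join(cur))
--                 cur = []
--         else:
--             cur.append(ch)
--     if cur:
--         tokens.append(''.join(cur))
--     return list(dict.fromkeys(tokens))
-- ===== Notes on version B (the rewrite author's own statement) =====
-- stated objective: simpler
-- what changed: Replaces A's nested comma-split + per-chunk whitespace-split + strip passes and the explicit seen-set dedup loop by a single character scan that emits tokens at comma-or-whitespace boundaries, followed by one order-preserving dict.fromkeys dedup.
import Mathlib
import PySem

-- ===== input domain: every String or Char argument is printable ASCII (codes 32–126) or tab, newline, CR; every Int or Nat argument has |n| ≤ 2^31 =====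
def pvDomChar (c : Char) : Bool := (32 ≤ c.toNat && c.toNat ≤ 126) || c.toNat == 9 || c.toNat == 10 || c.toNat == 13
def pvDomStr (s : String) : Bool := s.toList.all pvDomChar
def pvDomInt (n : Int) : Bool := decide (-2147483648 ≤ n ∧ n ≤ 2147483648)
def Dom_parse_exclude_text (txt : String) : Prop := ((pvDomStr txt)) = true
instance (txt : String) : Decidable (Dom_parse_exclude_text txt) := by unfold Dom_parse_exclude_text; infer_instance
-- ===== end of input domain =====

-- B replaces A's nested comma-split/whitespace-split/strip passes and the seen-set dedup loop by a
-- single character scan that tokenizes on commas-or-whitespace, followed by one ordered dedup (simpler).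

-- ===== PORT A =====
def parse_exclude_text (txt : String) : List String :=
  let t := PySem.Str.strip txt
  if t = "" then []
  else
    let parts : List String :=
      ((PySem.Str.split? t ",").getD []).foldl (fun acc chunk =>
        let c := PySem.Str.strip chunk
        if c = "" then acc
        else acc ++ ((PySem.Str.split₀ c).filter
              (fun p => !(PySem.Str.strip p == ""))).map PySem.Str.strip) []
    (parts.foldl (fun (so : PySem.Set String × List String) p =>
        if PySem.Set.contains so.1 p then so else (PySem.Set.add so.1 p, so.2 ++ [p]))
      (PySem.Set.empty, [])).2

-- ===== PORT B =====
-- one step of B's character loop: state = (tokens so far, current word's chars)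
def pvStepB (st : List String × List Char) (c : Char) : List String × List Char :=
  if c == ',' || PySem.Chars.isspace c then
    if st.2 = [] then st else (st.1 ++ [String.ofList st.2], [])
  else (st.1, st.2 ++ [c])

def parse_exclude_text_alt (txt : String) : List String :=
  let st := txt.toList.foldl pvStepB ([], [])
  let tokens := if st.2 = [] then st.1 else st.1 ++ [String.ofList st.2]
  PySem.List.dedup tokens

-- ===== PRECONDITION & SPEC =====
def Spec_parse_exclude_text (txt : String) (out : List String) : Prop := out = parse_exclude_text_alt txt
instance (txt : String) (out : List String) : Decidable (Spec_parse_exclude_text txt out) := by unfold Spec_parse_exclude_text; infer_instance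

-- ===== CLAIM (what is proved, stated in full; the proofs are below) =====
def Claim_equal_parse_exclude_text : Prop := ∀ (txt : String), Dom_parse_exclude_text txt → Spec_parse_exclude_text txt (parse_exclude_text txt)

-- ===== LEMMAS AND PROOFS =====

-- char-level tokenizer with a parameterised separator predicate
def pvStepT (sep : Char → Bool) (st : List (List Char) × List Char) (c : Char) :
    List (List Char) × List Char :=
  if sep c then (if st.2 = [] then st else (st.1 ++ [st.2], [])) else (st.1, st.2 ++ [c])

def pvFinT (st : List (List Char) × List Char) : List (List Char) :=
  if st.2 = [] then st.1 else st.1 ++ [st.2]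

def pvTok (sep : Char → Bool) (cs : List Char) : List (List Char) :=
  pvFinT (cs.foldl (pvStepT sep) ([], []))

def pvSep2 (c : Char) : Bool := c == ',' || PySem.Chars.isspace c

-- comma chunker (empty chunks kept, like str.split(","))
def pvStepC (st : List (List Char) × List Char) (c : Char) : List (List Char) × List Char :=
  if c == ',' then (st.1 ++ [st.2], []) else (st.1, st.2 ++ [c])

theorem pvFactorT (sep : Char → Bool) (cs : List Char) (t : List (List Char)) (p : List Char) :
    cs.foldl (pvStepT sep) (t, p) =
      (t ++ (cs.foldl (pvStepT sep) ([], p)).1, (cs.foldl (pvStepT sep) ([], p)).2) := by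
  induction cs generalizing t p with
  | nil => simp
  | cons c r ih =>
    simp only [List.foldl_cons, pvStepT]
    split_ifs with h1 h2
    · rw [ih t p, ih [] p]
    · rw [ih (t ++ [p]) [], List.nil_append, ih [p] []]
      simp [List.append_assoc]
    · rw [ih t (p ++ [c]), ih [] (p ++ [c])]

theorem pvFinFactorT (sep : Char → Bool) (cs : List Char) (t : List (List Char)) (p : List Char) :
    pvFinT (cs.foldl (pvStepT sep) (t, p)) = t ++ pvFinT (cs.foldl (pvStepT sep) ([], p)) := by
  rw [pvFactorT]
  unfold pvFinT
  split_ifs <;> simp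

theorem pvFactorC (cs : List Char) (t : List (List Char)) (p : List Char) :
    cs.foldl pvStepC (t, p) =
      (t ++ (cs.foldl pvStepC ([], p)).1, (cs.foldl pvStepC ([], p)).2) := by
  induction cs generalizing t p with
  | nil => simp
  | cons c r ih =>
    simp only [List.foldl_cons, pvStepC]
    split_ifs with h1
    · rw [ih (t ++ [p]) [], List.nil_append, ih [p] []]
      simp [List.append_assoc]
    · rw [ih t (p ++ [c]), ih [] (p ++ [c])]

-- Python's whitespace split is the tokenizer with sep = isspace
theorem pvSplit₀_go_eq (cs : List Char) : ∀ (cur : List Char) (acc : List (List Char)),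
    PySem.Chars.split₀.go cs cur acc =
      acc.reverse ++ pvFinT (cs.foldl (pvStepT PySem.Chars.isspace) ([], cur.reverse)) := by
  induction cs with
  | nil =>
    intro cur acc
    simp only [PySem.Chars.split₀.go, List.foldl_nil, pvFinT]
    rcases cur with _ | ⟨c, cur⟩ <;> simp
  | cons c r ih =>
    intro cur acc
    simp only [PySem.Chars.split₀.go, List.foldl_cons, pvStepT]
    by_cases hs : PySem.Chars.isspace c = true
    · by_cases hc : cur = []
      · subst hc
        simp only [hs, if_true, List.isEmpty_nil, List.reverse_nil]
        exact ih [] acc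
      · have hcE : cur.isEmpty = false := by simpa using hc
        have hcR : ¬(cur.reverse = []) := by simpa using hc
        simp only [hs, if_true, hcE, Bool.false_eq_true, if_false, hcR]
        rw [ih [] (cur.reverse :: acc), List.nil_append,
          pvFinFactorT PySem.Chars.isspace r [cur.reverse] []]
        simp [List.append_assoc]
    · simp only [hs, Bool.false_eq_true, if_false]
      rw [ih (c :: cur) acc]
      simp

theorem pvSplit₀_eq_tok (cs : List Char) :
    PySem.Chars.split₀ cs = pvTok PySem.Chars.isspace cs := by
  rw [PySem.Chars.split₀, pvSplit₀_go_eq]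
  simp [pvTok]

-- str.split(",") is the comma chunker
theorem pvSplitOn_go_eq (cs : List Char) : ∀ (fuel : Nat), cs.length ≤ fuel →
    ∀ (cur : List Char) (acc : List (List Char)),
    PySem.Chars.splitOn.go [','] fuel cs cur acc =
      acc.reverse ++ (cs.foldl pvStepC ([], cur.reverse)).1 ++ [(cs.foldl pvStepC ([], cur.reverse)).2] := by
  induction cs with
  | nil =>
    intro fuel _ cur acc
    rcases fuel with _ | fuel <;> simp [PySem.Chars.splitOn.go]
  | cons c r ih =>
    intro fuel hf cur acc
    rcases fuel with _ | fuel
    · simp at hf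
    simp only [PySem.Chars.splitOn.go, List.foldl_cons, pvStepC]
    have hpre : [','].isPrefixOf (c :: r) = (',' == c) := by
      simp [List.isPrefixOf]
    rw [hpre]
    by_cases h : c = ','
    · subst h
      simp only [beq_self_eq_true, if_true]
      rw [show List.drop [','].length (',' :: r) = r from rfl]
      rw [ih fuel (by simpa using hf) [] (cur.reverse :: acc)]
      rw [List.nil_append, pvFactorC r [cur.reverse] []]
      simp only [List.reverse_cons, List.reverse_nil, List.append_assoc]
    · have hb : (',' == c) = false := by
        rw [beq_eq_false_iff_ne]; exact Ne.symm h
      have hb' : (c == ',') = false := by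
        rw [beq_eq_false_iff_ne]; exact h
      rw [hb, hb']
      simp only [Bool.false_eq_true, if_false]
      rw [ih fuel (by simpa using Nat.le_of_succ_le_succ hf) (c :: cur) acc]
      simp only [List.reverse_cons]

theorem pvSplitOn_eq (cs : List Char) :
    PySem.Chars.splitOn cs [','] =
      (cs.foldl pvStepC ([], [])).1 ++ [(cs.foldl pvStepC ([], [])).2] := by
  rw [PySem.Chars.splitOn, pvSplitOn_go_eq cs (cs.length + 1) (by omega)]
  simp

-- an all-separator suffix does not change the finished tokens
theorem pvFinT_sepSuffix (sep : Char → Bool) (zs : List Char) (h : ∀ c ∈ zs, sep c = true) :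
    ∀ st, pvFinT (zs.foldl (pvStepT sep) st) = pvFinT st := by
  induction zs with
  | nil => intro st; rfl
  | cons z r ih =>
    intro st
    have hz := h z (by simp)
    have hr : ∀ c ∈ r, sep c = true := fun c hc => h c (by simp [hc])
    simp only [List.foldl_cons, pvStepT, hz, if_true]
    rw [ih hr]
    unfold pvFinT
    split_ifs <;> simp_all

-- leading whitespace does not change the tokens (state ([],[]) absorbs separators)
theorem pvTok_lstrip (sep : Char → Bool) (hsp : ∀ c, PySem.Chars.isspace c = true → sep c = true)
    (cs : List Char) :
    (PySem.Chars.lstrip cs).foldl (pvStepT sep) ([], []) = cs.foldl (pvStepT sep) ([], []) := by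
  induction cs with
  | nil => rfl
  | cons c r ih =>
    by_cases h : PySem.Chars.isspace c = true
    · have := hsp c h
      simp [PySem.Chars.lstrip, h, List.foldl_cons, pvStepT, this] at *
      exact ih
    · simp [PySem.Chars.lstrip, h]

theorem pvTok_strip (sep : Char → Bool) (hsp : ∀ c, PySem.Chars.isspace c = true → sep c = true)
    (cs : List Char) : pvTok sep (PySem.Chars.strip cs) = pvTok sep cs := by
  unfold pvTok
  have hl := pvTok_lstrip sep hsp cs
  -- decompose lstrip cs as (rstrip (lstrip cs)) ++ trailing spaces
  set x := PySem.Chars.lstrip cs with hx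
  have hdec : x = PySem.Chars.rstrip x ++ (x.reverse.takeWhile PySem.Chars.isspace).reverse := by
    unfold PySem.Chars.rstrip
    have h2 := congrArg List.reverse
      (List.takeWhile_append_dropWhile (p := PySem.Chars.isspace) (l := x.reverse))
    rw [List.reverse_append, List.reverse_reverse] at h2
    exact h2.symm
  have hall : ∀ c ∈ (x.reverse.takeWhile PySem.Chars.isspace).reverse, sep c = true := by
    intro c hc
    exact hsp c (List.mem_takeWhile_imp (List.mem_reverse.mp hc))
  rw [PySem.Chars.strip, ← hx]
  conv_rhs => rw [← hl, hdec]
  rw [List.foldl_append]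
  rw [pvFinT_sepSuffix sep _ hall]

-- every token is nonempty and separator-free
theorem pvTok_inv (sep : Char → Bool) (cs : List Char) :
    ∀ (t : List (List Char)) (q : List Char),
      (∀ x ∈ t, x ≠ [] ∧ ∀ c ∈ x, sep c = false) → (∀ c ∈ q, sep c = false) →
      ∀ p ∈ pvFinT (cs.foldl (pvStepT sep) (t, q)), p ≠ [] ∧ ∀ c ∈ p, sep c = false := by
  induction cs with
  | nil =>
    intro t q ht hq p hp
    unfold pvFinT at hp
    split_ifs at hp with h
    · exact ht p hp
    · rcases List.mem_append.mp hp with h' | h'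
      · exact ht p h'
      · simp at h'; subst h'; exact ⟨h, hq⟩
  | cons c r ih =>
    intro t q ht hq p hp
    simp only [List.foldl_cons, pvStepT] at hp
    split_ifs at hp with h1 h2
    · exact ih t q ht hq p hp
    · refine ih (t ++ [q]) [] ?_ (by simp) p hp
      intro x hx
      rcases List.mem_append.mp hx with h' | h'
      · exact ht x h'
      · simp at h'; subst h'; exact ⟨h2, hq⟩
    · refine ih t (q ++ [c]) ht ?_ p hp
      intro d hd
      rcases List.mem_append.mp hd with h' | h'
      · exact hq d h'
      · simp at h'; subst h'; simpa using h1

theorem pvMem_tok (sep : Char → Bool) (cs : List Char) (p : List Char) (hp : p ∈ pvTok sep cs) :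
    p ≠ [] ∧ ∀ c ∈ p, sep c = false :=
  pvTok_inv sep cs [] [] (by simp) (by simp) p hp

-- strip is the identity on a whitespace-free word
theorem pvStrip_id (p : List Char) (h : ∀ c ∈ p, PySem.Chars.isspace c = false) :
    PySem.Chars.strip p = p := by
  have hl : PySem.Chars.lstrip p = p := by
    unfold PySem.Chars.lstrip
    rw [List.dropWhile_eq_self_iff]
    intro hl; exact by simpa using h p[0] (by simp)
  have hr : PySem.Chars.rstrip p = p := by
    unfold PySem.Chars.rstrip
    rw [List.dropWhile_eq_self_iff.mpr ?_]
    · simp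
    · intro hl
      have : p.reverse[0] ∈ p := List.mem_reverse.mp (by simp)
      simpa using h _ this
  rw [PySem.Chars.strip, hl, hr]

-- the fusion: comma-chunking then whitespace-splitting each chunk = one combined scan
theorem pvFusion (cs : List Char) : ∀ (q : List Char),
    ((cs.foldl pvStepC ([], q)).1 ++ [(cs.foldl pvStepC ([], q)).2]).flatMap (pvTok PySem.Chars.isspace) =
      pvFinT (cs.foldl (pvStepT pvSep2) (q.foldl (pvStepT PySem.Chars.isspace) ([], []))) := by
  induction cs with
  | nil =>
    intro q
    simp [pvTok, pvFinT]
  | cons c r ih =>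
    intro q
    simp only [List.foldl_cons, pvStepC, pvStepT]
    by_cases h : c = ','
    · subst h
      simp only [beq_self_eq_true, if_true]
      rw [List.nil_append, pvFactorC r [q] []]
      have hsep : pvSep2 ',' = true := by decide
      simp only [hsep, if_true]
      have hflush : (if (q.foldl (pvStepT PySem.Chars.isspace) ([], [])).2 = []
          then q.foldl (pvStepT PySem.Chars.isspace) ([], [])
          else ((q.foldl (pvStepT PySem.Chars.isspace) ([], [])).1 ++
                [(q.foldl (pvStepT PySem.Chars.isspace) ([], [])).2], [])) =
          (pvTok PySem.Chars.isspace q, ([] : List Char)) := by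
        unfold pvTok pvFinT
        split_ifs with h'
        · exact Prod.ext_iff.mpr ⟨rfl, h'⟩
        · rfl
      rw [hflush, pvFinFactorT pvSep2 r (pvTok PySem.Chars.isspace q) []]
      have ihq := ih []
      simp only [List.foldl_nil] at ihq
      rw [← ihq]
      simp [List.flatMap_append]
    · have hb : (c == ',') = false := by simp [h]
      rw [hb]
      simp only [Bool.false_eq_true, if_false]
      rw [ih (q ++ [c])]
      congr 1
      rw [List.foldl_append]
      simp only [List.foldl_cons, List.foldl_nil, pvStepT]
      have : pvSep2 c = PySem.Chars.isspace c := by simp [pvSep2, hb]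
      rw [this]

-- the seen-set loop keeps seen = out; its output is Set.ofList
theorem pvDedupLoop (ps : List String) : ∀ (s : List String),
    (ps.foldl (fun (so : PySem.Set String × List String) p =>
        if PySem.Set.contains so.1 p then so else (PySem.Set.add so.1 p, so.2 ++ [p])) (s, s)) =
      (ps.foldl PySem.Set.add s, ps.foldl PySem.Set.add s) := by
  induction ps with
  | nil => intro s; rfl
  | cons p r ih =>
    intro s
    by_cases hm : p ∈ s
    · have h : PySem.Set.contains s p = true := by
        simpa [PySem.Set.contains, List.contains_eq_mem] using hm
      have ha : PySem.Set.add s p = s := by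
        simp [PySem.Set.add, List.contains_eq_mem, hm]
      simp only [List.foldl_cons, h, if_true, ha]
      exact ih s
    · have h : PySem.Set.contains s p = false := by
        simpa [PySem.Set.contains, List.contains_eq_mem] using hm
      have ha : PySem.Set.add s p = s ++ [p] := by
        simp [PySem.Set.add, List.contains_eq_mem, hm]
      simp only [List.foldl_cons, h, Bool.false_eq_true, if_false, ha]
      exact ih (s ++ [p])

-- B's string-level loop tracks the char-level tokenizer
theorem pvAltLoop (cs : List Char) : ∀ (t : List (List Char)) (q : List Char),
    cs.foldl pvStepB (t.map String.ofList, q) =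
      ((cs.foldl (pvStepT pvSep2) (t, q)).1.map String.ofList, (cs.foldl (pvStepT pvSep2) (t, q)).2) := by
  induction cs with
  | nil => intro t q; rfl
  | cons c r ih =>
    intro t q
    simp only [List.foldl_cons, pvStepB, pvStepT, pvSep2]
    split_ifs with h1 h2
    · exact ih t q
    · have : t.map String.ofList ++ [String.ofList q] = (t ++ [q]).map String.ofList := by simp
      rw [this]; exact ih (t ++ [q]) []
    · exact ih t (q ++ [c])

-- B's result, char-level
theorem pvAlt_eq (txt : String) :
    parse_exclude_text_alt txt =
      PySem.List.dedup ((pvTok pvSep2 txt.toList).map String.ofList) := by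
  unfold parse_exclude_text_alt
  have := pvAltLoop txt.toList [] []
  simp only [List.map_nil] at this
  rw [this]
  unfold pvTok pvFinT
  split_ifs with h <;> simp [h]

-- empty strip means every char is whitespace, hence no tokens
theorem pvStrip_nil_tok (cs : List Char) (h : PySem.Chars.strip cs = []) :
    pvTok pvSep2 cs = [] := by
  rw [← pvTok_strip pvSep2 (fun c hc => by simp [pvSep2, hc]) cs, h]
  rfl

-- A's parts equal the combined-scan tokens (string level)
theorem pvParts_eq (t : String) :
    (((PySem.Str.split? t ",").getD []).foldl (fun acc chunk =>
        let c := PySem.Str.strip chunk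
        if c = "" then acc
        else acc ++ ((PySem.Str.split₀ c).filter
              (fun p => !(PySem.Str.strip p == ""))).map PySem.Str.strip) []) =
      (pvTok pvSep2 t.toList).map String.ofList := by
  have hsplit : (PySem.Str.split? t ",").getD [] =
      ((t.toList.foldl pvStepC ([], [])).1 ++ [(t.toList.foldl pvStepC ([], [])).2]).map String.ofList := by
    rw [show (PySem.Str.split? t ",") =
        some ((PySem.Chars.splitOn t.toList [',']).map String.ofList) from by
      simp [PySem.Str.split?, PySem.Chars.split?, show (",":String).toList = [','] from rfl]]
    rw [Option.getD_some, pvSplitOn_eq]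
  rw [hsplit, List.foldl_map]
  have hchunk : ∀ (acc : List String) (chcs : List Char),
      (let c := PySem.Str.strip (String.ofList chcs)
       if c = "" then acc
       else acc ++ ((PySem.Str.split₀ c).filter
            (fun p => !(PySem.Str.strip p == ""))).map PySem.Str.strip) =
      acc ++ (pvTok PySem.Chars.isspace chcs).map String.ofList := by
    intro acc chcs
    have hstripc : PySem.Str.strip (String.ofList chcs) = String.ofList (PySem.Chars.strip chcs) := by
      simp [PySem.Str.strip]
    by_cases hempty : PySem.Chars.strip chcs = []
    · have htok : pvTok PySem.Chars.isspace chcs = [] := by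
        rw [← pvTok_strip PySem.Chars.isspace (fun c hc => hc) chcs, hempty]; rfl
      simp [hstripc, hempty, htok]
    · have hne : String.ofList (PySem.Chars.strip chcs) ≠ "" := by
        intro hcon
        exact hempty (String.ofList_inj.mp (hcon.trans rfl))
      simp only [hstripc, hne, if_false]
      congr 1
      have hsplitc : PySem.Str.split₀ (String.ofList (PySem.Chars.strip chcs)) =
          (pvTok PySem.Chars.isspace chcs).map String.ofList := by
        simp only [PySem.Str.split₀, String.toList_ofList]
        rw [pvSplit₀_eq_tok, pvTok_strip PySem.Chars.isspace (fun c hc => hc)]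
      rw [hsplitc, List.filter_map, List.map_map]
      have hid : ∀ p ∈ pvTok PySem.Chars.isspace chcs,
          PySem.Str.strip (String.ofList p) = String.ofList p := by
        intro p hp
        obtain ⟨hne', hnosp⟩ := pvMem_tok PySem.Chars.isspace chcs p hp
        simp [PySem.Str.strip, pvStrip_id p hnosp]
      have hkeep : (pvTok PySem.Chars.isspace chcs).filter
          ((fun p => !(PySem.Str.strip p == "")) ∘ String.ofList) = pvTok PySem.Chars.isspace chcs := by
        apply List.filter_eq_self.mpr
        intro p hp
        obtain ⟨hne', _⟩ := pvMem_tok PySem.Chars.isspace chcs p hp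
        simp only [Function.comp_apply, hid p hp, Bool.not_eq_eq_eq_not, Bool.not_true]
        rw [beq_eq_false_iff_ne]
        intro hcon
        exact hne' (String.ofList_inj.mp (hcon.trans rfl))
      rw [hkeep]
      apply List.map_congr_left
      intro p hp
      exact hid p hp
  have hbody : (List.foldl (fun acc chcs =>
      (let c := PySem.Str.strip (String.ofList chcs)
       if c = "" then acc
       else acc ++ ((PySem.Str.split₀ c).filter
            (fun p => !(PySem.Str.strip p == ""))).map PySem.Str.strip))
      [] ((t.toList.foldl pvStepC ([], [])).1 ++ [(t.toList.foldl pvStepC ([], [])).2])) =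
      (List.foldl (fun acc chcs => acc ++ (pvTok PySem.Chars.isspace chcs).map String.ofList)
      [] ((t.toList.foldl pvStepC ([], [])).1 ++ [(t.toList.foldl pvStepC ([], [])).2])) := by
    apply PySem.List.foldl_congr_mem
    intro acc chcs _
    exact hchunk acc chcs
  rw [hbody, PySem.List.foldl_append_eq_flatMap (fun chcs => (pvTok PySem.Chars.isspace chcs).map String.ofList)]
  rw [List.nil_append]
  have := pvFusion t.toList []
  simp only [List.foldl_nil] at this
  rw [show (List.flatMap (fun chcs => (pvTok PySem.Chars.isspace chcs).map String.ofList)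
      ((t.toList.foldl pvStepC ([], [])).1 ++ [(t.toList.foldl pvStepC ([], [])).2])) =
      (List.flatMap (pvTok PySem.Chars.isspace)
      ((t.toList.foldl pvStepC ([], [])).1 ++ [(t.toList.foldl pvStepC ([], [])).2])).map String.ofList from by
    rw [List.map_flatMap]]
  rw [this]
  rfl

-- ===== VERDICT (by name: the statement is the Claim_ definition above) =====
theorem parse_exclude_text_spec : Claim_equal_parse_exclude_text := by
  intro txt _
  unfold Spec_parse_exclude_text parse_exclude_text
  rw [pvAlt_eq]
  simp only []
  by_cases h : PySem.Str.strip txt = ""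
  · have hnil : PySem.Chars.strip txt.toList = [] := by
      have := PySem.Str.toList_strip txt
      rw [h] at this
      exact this.symm
    rw [if_pos h, pvStrip_nil_tok txt.toList hnil]
    rfl
  · rw [if_neg h]
    have hts : (PySem.Str.strip txt).toList = PySem.Chars.strip txt.toList := PySem.Str.toList_strip txt
    rw [pvParts_eq, hts, pvTok_strip pvSep2 (fun c hc => by simp [pvSep2, hc])]
    have := pvDedupLoop ((pvTok pvSep2 txt.toList).map String.ofList) []
    rw [show (PySem.Set.empty, ([] : List String)) = (([] : List String), ([] : List String)) from rfl]
    rw [this]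
    rw [PySem.List.dedup_eq_ofList]
    rfl
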